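-- pv_equiv track=rewrite | github.com/Ricoter/AdventOfCode | 2022/Python/day18.py | part1
-- ===== SOURCE A (Python) =====
-- def d_manhattan(a, b):
--     return sum([abs(a[i] - b[i]) for i in range(len(a))])
--
-- def part1(data : list) -> int:
--     pixels = len(data)
--     sides = pixels * 6
--     for i, a in enumerate(data):
--         for b in data[i+1:]:
--             if d_manhattan(a, b) == 1:
--                 sides -= 2
--     return sides
-- ===== SOURCE B (Python) =====
-- def part1(data: list) -> int:
--     adj = 0
--     seen = {}
--     for row in data:
--         t = tuple(row)
--         for k in range(len(t)):
--             for d in (1, -1):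
--                 nb = list(t)
--                 nb[k] += d
--                 adj += seen.get(tuple(nb), 0)
--         seen[t] = seen.get(t, 0) + 1
--     return 6 * len(data) - 2 * adj
-- ===== Notes on version B (the rewrite author's own statement) =====
-- stated objective: faster
-- what changed: replaces the all-pairs O(n^2) manhattan-distance scan by a single pass that keeps a hash-map counter of the rows seen so far and counts adjacencies by looking up each row's 2*dim unit-offset neighbour tuples, so the inner scan disappears
-- intended difference: On inputs where an earlier row is strictly shorter than a later row and the distance over the first len(earlier) coordinates is 1, A counts the pair as touching (d_manhattan truncates to range(len(a)), an accident) and returns a value smaller by 2 per such pair; B treats cubes of different dimension as never adjacent, which is the intended reading of surface area of unit cubes. — e.g. on part1([[5], [4, 9]]): A returns 10, B returns 12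
import Mathlib
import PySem

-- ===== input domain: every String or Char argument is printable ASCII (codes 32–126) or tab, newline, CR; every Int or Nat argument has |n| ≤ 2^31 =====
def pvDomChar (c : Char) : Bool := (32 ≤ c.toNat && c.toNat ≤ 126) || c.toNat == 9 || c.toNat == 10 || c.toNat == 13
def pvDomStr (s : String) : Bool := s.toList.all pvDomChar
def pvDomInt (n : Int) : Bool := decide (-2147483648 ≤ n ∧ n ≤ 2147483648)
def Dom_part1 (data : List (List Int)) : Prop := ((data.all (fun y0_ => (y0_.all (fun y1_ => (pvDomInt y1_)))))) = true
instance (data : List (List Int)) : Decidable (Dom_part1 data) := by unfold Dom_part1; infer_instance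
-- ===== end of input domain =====

-- B replaces A's O(n^2) all-pairs scan by one pass with a hash-map counter of earlier rows,
-- looking up each row's unit-offset neighbour tuples (objective: faster).

-- ===== PORT A =====
-- sum([abs(a[i] - b[i]) for i in range(len(a))]); pyGetD is exact here because under
-- Pre_part1 every index i < len(a) ≤ len(b) is in range (outside Pre_ the Python raises).
def dManhattan (a b : List Int) : Int :=
  (((PySem.List.pyRange 0 (a.length : Int) 1).map
      (fun i => |PySem.List.pyGetD a i 0 - PySem.List.pyGetD b i 0|))).sum

def part1 (data : List (List Int)) : Int :=
  let pixels : Int := data.length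
  let sides : Int := pixels * 6
  (PySem.List.enumerate data 0).foldl
    (fun sides ia =>
      (PySem.List.slice data (some (ia.1 + 1)) none).foldl
        (fun sides b => if dManhattan ia.2 b = 1 then sides - 2 else sides)
        sides)
    sides

-- ===== PORT B =====
-- one pass; seen is the counter dict of earlier rows; nb = list(t); nb[k] += d is an
-- in-range list write (0 ≤ k < len(t)), ported as List.set / pyGetD.
def part1_alt (data : List (List Int)) : Int :=
  let fin := data.foldl
    (fun (st : Int × PySem.Dict (List Int) Int) row =>
      let t := row
      let adj := (PySem.List.pyRange 0 ((t.length : Int)) 1).foldl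
        (fun adj k =>
          ([(1 : Int), -1]).foldl
            (fun adj d =>
              let nb := t.set k.toNat (PySem.List.pyGetD t k 0 + d)
              adj + st.2.getD nb 0)
            adj)
        st.1
      (adj, st.2.insert t (st.2.getD t 0 + 1)))
    ((0 : Int), PySem.Dict.empty)
  6 * (data.length : Int) - 2 * fin.1

-- ===== PRECONDITION & SPEC =====
-- Pre_part1 is exactly A's return domain: A raises IndexError as soon as some later row is
-- shorter than an earlier one (d_manhattan indexes b[i] for every i < len(a)), i.e. it
-- returns iff the row lengths are nondecreasing.
def Pre_part1 (data : List (List Int)) : Prop :=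
  (data.map List.length).Pairwise (· ≤ ·)
instance (data : List (List Int)) : Decidable (Pre_part1 data) := by unfold Pre_part1; infer_instance

def pvWitness_part1 : List (List Int) := [[0, 0, 0], [0, 0, 1], [2, 0, 1]]

-- spec-side truncated distance: sum of |a[i]-b[i]| over the first len(a) coordinates
def truncDist (a b : List Int) : Int :=
  ((List.range a.length).map (fun j => |a.getD j 0 - b.getD j 0|)).sum

-- On inputs where an earlier row is strictly shorter than a later row at truncated
-- (first len(earlier) coordinates) distance 1, A counts the pair as touching — an accident
-- of d_manhattan's range(len(a)) — and returns a value smaller by 2 per such pair; B treats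
-- cubes of different dimension as never adjacent, the intended reading of surface area.
def D_part1 (data : List (List Int)) : Prop :=
  ¬ data.Pairwise (fun a b => ¬ (a.length < b.length ∧ truncDist a b = 1))
instance (data : List (List Int)) : Decidable (D_part1 data) := by unfold D_part1; infer_instance

def Spec_part1 (data : List (List Int)) (out : Int) : Prop := ¬ D_part1 data → out = part1_alt data
instance (data : List (List Int)) (out : Int) : Decidable (Spec_part1 data out) := by unfold Spec_part1; infer_instance

def pvDiffWitness_part1 : List (List Int) := [[5], [4, 9]]
def pvDiffWitnessOut_part1 : Int × Int := (10, 12)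

-- ===== CLAIM (what is proved, stated in full; the proofs are below) =====
def Claim_unchanged_part1 : Prop := ∀ (data : List (List Int)), Dom_part1 data → Pre_part1 data → Spec_part1 data (part1 data)
def Claim_changed_part1 : Prop := Dom_part1 (pvDiffWitness_part1) ∧ Pre_part1 (pvDiffWitness_part1) ∧ D_part1 (pvDiffWitness_part1) ∧ part1 (pvDiffWitness_part1) = pvDiffWitnessOut_part1.1 ∧ part1_alt (pvDiffWitness_part1) = pvDiffWitnessOut_part1.2 ∧ pvDiffWitnessOut_part1.1 ≠ pvDiffWitnessOut_part1.2
def Claim_exact_part1 : Prop := ∀ (data : List (List Int)), Dom_part1 data → Pre_part1 data → D_part1 data → part1 data ≠ part1_alt data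

-- ===== LEMMAS AND PROOFS =====

-- pair predicates: A counts truncated distance 1; B counts equal-length full distance 1;
-- the bad pairs are exactly their difference
def adjB (r b : List Int) : Bool := decide (r.length = b.length) && decide (dManhattan r b = 1)
def badP (r b : List Int) : Bool := decide (r.length < b.length) && decide (dManhattan r b = 1)

-- generic "count pairs (earlier, later) satisfying P" and its prefix-passing form
def pcF (P : List Int → List Int → Bool) : List (List Int) → Nat
  | [] => 0
  | x :: xs => xs.countP (fun b => P x b) + pcF P xs

def pcF' (P : List Int → List Int → Bool) : List (List Int) → List (List Int) → Nat
  | _, [] => 0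
  | p, b :: suf => p.countP (fun r => P r b) + pcF' P (p ++ [b]) suf

def stepB (st : Int × PySem.Dict (List Int) Int) (row : List Int) : Int × PySem.Dict (List Int) Int :=
  let t := row
  let adj := (PySem.List.pyRange 0 ((t.length : Int)) 1).foldl
    (fun adj k =>
      ([(1 : Int), -1]).foldl
        (fun adj d =>
          let nb := t.set k.toNat (PySem.List.pyGetD t k 0 + d)
          adj + st.2.getD nb 0)
        adj)
    st.1
  (adj, st.2.insert t (st.2.getD t 0 + 1))

theorem part1_alt_eq_fold (data : List (List Int)) :
    part1_alt data = 6 * (data.length : Int) - 2 * (data.foldl stepB ((0 : Int), PySem.Dict.empty)).1 := rfl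

theorem pvFoldlCongr {α β : Type} (l : List β) (f g : α → β → α) (a : α)
    (h : ∀ a x, x ∈ l → f a x = g a x) : l.foldl f a = l.foldl g a := by
  induction l generalizing a with
  | nil => rfl
  | cons x xs ih =>
    simp only [List.foldl_cons]
    rw [h a x (by simp)]
    exact ih _ (fun a' y hy => h a' y (by simp [hy]))

theorem foldl_pyRange_zero_nat {α : Type} (n : Nat) (f : α → Int → α) (a : α) :
    (PySem.List.pyRange 0 (n : Int) 1).foldl f a
      = (List.range n).foldl (fun (a : α) (j : Nat) => f a (j : Int)) a := by
  rw [PySem.List.pyRange_one]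
  simp only [sub_zero, Int.toNat_natCast, List.foldl_map, zero_add]

-- ---------- A side ----------

theorem innerA (a0 : List Int) (l : List (List Int)) (s : Int) :
    l.foldl (fun s b => if dManhattan a0 b = 1 then s - 2 else s) s
      = s - 2 * (l.countP (fun b => decide (dManhattan a0 b = 1)) : Int) := by
  induction l generalizing s with
  | nil => simp
  | cons b l ih =>
    simp only [List.foldl_cons, List.countP_cons]
    rw [ih]
    by_cases h : dManhattan a0 b = 1
    · rw [if_pos h, if_pos (by simp [h] : decide (dManhattan a0 b = 1) = true)]
      push_cast
      ring
    · rw [if_neg h, if_neg (by simp [h] : ¬ decide (dManhattan a0 b = 1) = true)]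
      push_cast
      ring

theorem outerA (data : List (List Int)) : ∀ (suf : List (List Int)) (m : Nat) (s : Int),
    data.drop m = suf →
    (PySem.List.enumerate suf (m : Int)).foldl
        (fun s ia =>
          (PySem.List.slice data (some (ia.1 + 1)) none).foldl
            (fun s b => if dManhattan ia.2 b = 1 then s - 2 else s) s) s
      = s - 2 * (pcF (fun x b => decide (dManhattan x b = 1)) suf : Int) := by
  intro suf
  induction suf with
  | nil => intro m s _; simp [pcF]
  | cons x suf ih =>
    intro m s hdrop
    rw [PySem.List.enumerate_cons]
    simp only [List.foldl_cons]
    have hc : ((m : Int) + 1) = ((m + 1 : Nat) : Int) := by push_cast; ring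
    have hdrop' : data.drop (m + 1) = suf := by
      have h1 := congrArg (List.drop 1) hdrop
      rw [List.drop_drop] at h1
      simpa [Nat.add_comm] using h1
    rw [hc, PySem.List.slice_from_natCast, hdrop', innerA, ih (m + 1) _ hdrop']
    simp only [pcF]
    push_cast
    ring

theorem part1_eq (data : List (List Int)) :
    part1 data = (data.length : Int) * 6
      - 2 * (pcF (fun x b => decide (dManhattan x b = 1)) data : Int) := by
  have h := outerA data data 0 ((data.length : Int) * 6) (by simp)
  simpa [part1] using h

-- ---------- Nat-level sum helpers ----------

theorem sum_ite_eq_count (T : List (List Int)) (r : List Int) :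
    (T.map (fun q => if q = r then 1 else 0)).sum = T.countP (fun t => decide (t = r)) := by
  induction T with
  | nil => simp
  | cons q T ih =>
    rw [List.map_cons, List.sum_cons, List.countP_cons, ih]
    by_cases h : q = r
    · rw [if_pos h, if_pos (by simp [h])]
      omega
    · rw [if_neg h, if_neg (by simp [h])]
      omega

theorem sum_ite_pred {α : Type} (l : List α) (p : α → Bool) :
    (l.map (fun x => if p x then 1 else 0)).sum = l.countP p := by
  induction l with
  | nil => simp
  | cons x l ih =>
    simp only [List.map_cons, List.sum_cons, List.countP_cons, ih]
    split_ifs <;> omega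

theorem sum_zero_of {α : Type} (l : List α) (f : α → Nat) (h : ∀ x ∈ l, f x = 0) :
    (l.map f).sum = 0 := by
  rw [List.map_congr_left h]
  simp

theorem sum_map_add_nat {α : Type} (l : List α) (f g : α → Nat) :
    (l.map (fun x => f x + g x)).sum = (l.map f).sum + (l.map g).sum := by
  induction l with
  | nil => simp
  | cons x xs ih => simp [ih]; omega

theorem count_eq_cnt (l : List (List Int)) (a : List Int) :
    l.count a = l.countP (fun t => decide (t = a)) := by
  induction l with
  | nil => simp
  | cons x l ih =>
    rw [List.count_cons, List.countP_cons, ih]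
    congr 1
    by_cases hh : x = a
    · simp [hh]
    · have h2 : ¬ a = x := fun e => hh e.symm
      simp [hh]

theorem swapCount (T : List (List Int)) (p : List (List Int)) :
    (T.map (fun q => p.countP (fun t => decide (t = q)))).sum
      = (p.map (fun r => T.countP (fun t => decide (t = r)))).sum := by
  induction p with
  | nil =>
    simp only [List.map_nil, List.sum_nil]
    exact sum_zero_of _ _ (fun q _ => by simp)
  | cons r p ih =>
    simp only [List.map_cons, List.sum_cons]
    have hps : (T.map (fun q => (r :: p).countP (fun t => decide (t = q))))
        = T.map (fun q => p.countP (fun t => decide (t = q)) + if q = r then 1 else 0) := by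
      apply List.map_congr_left
      intro q _
      rw [List.countP_cons]
      congr 1
      by_cases h : r = q
      · simp [h]
      · have h' : ¬ q = r := fun hh => h hh.symm
        simp [h, h']
    rw [hps, sum_map_add_nat, ih, sum_ite_eq_count]
    omega

-- ---------- tweaks / manhattan ----------

-- B-side neighbour keys of a tuple, as a pure recursive function
def tweaks : List Int → List (List Int)
  | [] => []
  | y :: q => ((y + 1) :: q) :: ((y - 1) :: q) :: (tweaks q).map (fun t => y :: t)

theorem tweaks_length : ∀ (q : List Int), ∀ t ∈ tweaks q, t.length = q.length := by
  intro q
  induction q with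
  | nil => simp [tweaks]
  | cons y q ih =>
    intro t ht
    simp only [tweaks, List.mem_cons, List.mem_map] at ht
    rcases ht with h | h | ⟨u, hu, rfl⟩
    · subst h; simp
    · subst h; simp
    · simp [ih u hu]

theorem zip_nonneg : ∀ (r q : List Int), 0 ≤ (List.zipWith (fun x y => |x - y|) r q).sum := by
  intro r
  induction r with
  | nil => intro q; simp
  | cons x r ih =>
    intro q
    cases q with
    | nil => simp
    | cons y q =>
      simp only [List.zipWith_cons_cons, List.sum_cons]
      have h1 := ih q
      have h2 : (0 : Int) ≤ |x - y| := abs_nonneg _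
      omega

theorem zip_zero : ∀ (r q : List Int), r.length = q.length →
    ((List.zipWith (fun x y => |x - y|) r q).sum = 0 ↔ r = q) := by
  intro r
  induction r with
  | nil =>
    intro q h
    cases q with
    | nil => simp
    | cons y q => simp at h
  | cons x r ih =>
    intro q h
    cases q with
    | nil => simp at h
    | cons y q =>
      simp only [List.zipWith_cons_cons, List.sum_cons]
      have h1 := zip_nonneg r q
      have h2 : (0 : Int) ≤ |x - y| := abs_nonneg _
      constructor
      · intro h0
        have hx : |x - y| = 0 := by omega
        have hr : (List.zipWith (fun x y => |x - y|) r q).sum = 0 := by omega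
        have hxy : x = y := by
          have := abs_eq_zero.mp hx
          omega
        rw [hxy, (ih q (by simpa using h)).mp hr]
      · intro h0
        cases h0
        have h3 : (List.zipWith (fun x y => |x - y|) r r).sum = 0 := (ih r rfl).mpr rfl
        simp

theorem countTweaks : ∀ (q r : List Int), r.length = q.length →
    (tweaks q).countP (fun t => decide (t = r))
      = if (List.zipWith (fun x y => |x - y|) r q).sum = 1 then 1 else 0 := by
  intro q
  induction q with
  | nil =>
    intro r h
    have hr : r = [] := List.eq_nil_of_length_eq_zero (by simpa using h)
    subst hr
    simp [tweaks]
  | cons y q ih =>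
    intro r h
    cases r with
    | nil => simp at h
    | cons x r =>
      have hlen : r.length = q.length := by simpa using h
      have hS := zip_nonneg r q
      rw [show tweaks (y :: q) = ((y + 1) :: q) :: ((y - 1) :: q) :: (tweaks q).map (fun t => y :: t) from rfl]
      rw [List.countP_cons, List.countP_cons, List.countP_map]
      simp only [List.zipWith_cons_cons, List.sum_cons]
      by_cases hx : x = y
      · subst hx
        have e1 : (decide (((x + 1) :: q : List Int) = x :: r)) = false := by
          apply decide_eq_false
          intro hh; injection hh with h1 _; omega
        have e2 : (decide (((x - 1) :: q : List Int) = x :: r)) = false := by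
          apply decide_eq_false
          intro hh; injection hh with h1 _; omega
        have e3 : (tweaks q).countP ((fun t => decide (t = x :: r)) ∘ (fun t => x :: t))
            = (tweaks q).countP (fun t => decide (t = r)) := by
          apply List.countP_congr
          intro t _
          simp [Function.comp, List.cons.injEq]
        rw [e1, e2, e3, ih r hlen]
        have hxx : |x - x| = 0 := by simp
        simp only [hxx, zero_add]
        simp
      · have e3 : (tweaks q).countP ((fun t => decide (t = x :: r)) ∘ (fun t => y :: t)) = 0 := by
          apply List.countP_eq_zero.mpr
          intro t _
          simp only [Function.comp_apply, decide_eq_true_eq, List.cons.injEq, not_and]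
          intro h1
          exact absurd h1.symm hx
        rw [e3]
        by_cases h1 : x = y + 1
        · have e1 : (decide (((y + 1) :: q : List Int) = x :: r)) = decide (r = q) := by
            apply decide_eq_decide.mpr
            constructor
            · intro hh; injection hh with _ h2; exact h2.symm
            · intro hh; rw [hh, h1]
          have e2 : (decide (((y - 1) :: q : List Int) = x :: r)) = false := by
            apply decide_eq_false
            intro hh; injection hh with hh1 _; omega
          have habs1 : |x - y| = 1 := by
            have hv : x - y = 1 := by omega
            rw [hv]; simp
          rw [e1, e2]
          simp only [habs1]
          by_cases hrq : r = q
          · have hz : (List.zipWith (fun x y => |x - y|) r q).sum = 0 := (zip_zero r q hlen).mpr hrq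
            simp only [hz]
            simp [hrq]
          · have hz : ¬ (List.zipWith (fun x y => |x - y|) r q).sum = 0 :=
              fun hc => hrq ((zip_zero r q hlen).mp hc)
            have hc1 : (decide (r = q)) = false := decide_eq_false hrq
            have hc2 : ¬ (1 + (List.zipWith (fun x y => |x - y|) r q).sum = 1) :=
              fun hh => hz (by linarith)
            simp only [hc1]
            rw [if_neg hc2]
            simp
        · by_cases h2 : x = y - 1
          · have e1 : (decide (((y + 1) :: q : List Int) = x :: r)) = false := by
              apply decide_eq_false
              intro hh; injection hh with hh1 _; omega
            have e2 : (decide (((y - 1) :: q : List Int) = x :: r)) = decide (r = q) := by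
              apply decide_eq_decide.mpr
              constructor
              · intro hh; injection hh with _ hh2; exact hh2.symm
              · intro hh; rw [hh, h2]
            have habs1 : |x - y| = 1 := by
              have hv : x - y = -1 := by omega
              rw [hv]; simp
            rw [e1, e2]
            simp only [habs1]
            by_cases hrq : r = q
            · have hz : (List.zipWith (fun x y => |x - y|) r q).sum = 0 := (zip_zero r q hlen).mpr hrq
              simp only [hz]
              simp [hrq]
            · have hz : ¬ (List.zipWith (fun x y => |x - y|) r q).sum = 0 :=
                fun hc => hrq ((zip_zero r q hlen).mp hc)
              have hc1 : (decide (r = q)) = false := decide_eq_false hrq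
              have hc2 : ¬ (1 + (List.zipWith (fun x y => |x - y|) r q).sum = 1) :=
                fun hh => hz (by linarith)
              simp only [hc1]
              rw [if_neg hc2]
              simp
          · have e1 : (decide (((y + 1) :: q : List Int) = x :: r)) = false := by
              apply decide_eq_false
              intro hh; injection hh with hh1 _; omega
            have e2 : (decide (((y - 1) :: q : List Int) = x :: r)) = false := by
              apply decide_eq_false
              intro hh; injection hh with hh1 _; omega
            have habs2 : 2 ≤ |x - y| := by
              rcases abs_cases (x - y) with ⟨hh, _⟩ | ⟨hh, _⟩ <;> omega
            have hc2 : ¬ (|x - y| + (List.zipWith (fun x y => |x - y|) r q).sum = 1) :=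
              fun hh => by linarith
            rw [e1, e2, if_neg hc2]
            simp

theorem dManh_range (a b : List Int) :
    dManhattan a b = ((List.range a.length).map (fun j => |a.getD j 0 - b.getD j 0|)).sum := by
  unfold dManhattan
  rw [PySem.List.pyRange_one]
  simp only [sub_zero, Int.toNat_natCast, List.map_map]
  congr 1
  apply List.map_congr_left
  intro j _
  simp [PySem.List.pyGetD_natCast]

theorem truncDist_eq (a b : List Int) : truncDist a b = dManhattan a b := by
  rw [dManh_range]; rfl

theorem dManh_take : ∀ (r b : List Int), r.length ≤ b.length →
    dManhattan r b = (List.zipWith (fun x y => |x - y|) r (b.take r.length)).sum := by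
  intro r
  induction r with
  | nil => intro b _; simp [dManh_range]
  | cons x r ih =>
    intro b hb
    cases b with
    | nil => simp at hb
    | cons y b =>
      rw [dManh_range]
      simp only [List.length_cons, List.range_succ_eq_map, List.map_cons, List.map_map, List.sum_cons]
      simp only [List.getD_cons_zero]
      rw [List.take_succ_cons]
      simp only [List.zipWith_cons_cons, List.sum_cons]
      congr 1
      rw [← ih b (by simpa using hb), dManh_range]
      apply congrArg List.sum
      apply List.map_congr_left
      intro j _
      simp [Function.comp]

-- ---------- row sum: the k/d double loop equals a sum over tweaks ----------

theorem rowSumNat : ∀ (q : List Int) (G : List Int → Int) (a : Int),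
    (List.range q.length).foldl
        (fun a j => a + G (q.set j (q.getD j 0 + 1)) + G (q.set j (q.getD j 0 + -1))) a
      = a + ((tweaks q).map G).sum := by
  intro q
  induction q with
  | nil => intro G a; simp [tweaks]
  | cons y q ih =>
    intro G a
    simp only [List.length_cons, List.range_succ_eq_map, List.foldl_cons, List.foldl_map]
    simp only [List.set_cons_zero, List.getD_cons_zero]
    have hbody : ∀ (a : Int) (j : Nat), j ∈ List.range q.length →
        (a + G ((y :: q).set (j + 1) ((y :: q).getD (j + 1) 0 + 1))
           + G ((y :: q).set (j + 1) ((y :: q).getD (j + 1) 0 + -1)))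
          = (a + (fun t => G (y :: t)) (q.set j (q.getD j 0 + 1))
               + (fun t => G (y :: t)) (q.set j (q.getD j 0 + -1))) := by
      intro a' j _
      simp [List.set_cons_succ]
    rw [pvFoldlCongr _ _ _ _ hbody, ih (fun t => G (y :: t))]
    simp only [tweaks, List.map_cons, List.sum_cons, List.map_map]
    have hc : (G ∘ fun t => y :: t) = (fun t => G (y :: t)) := rfl
    rw [hc]
    simp only [sub_eq_add_neg]
    ring

-- ---------- the key lemma: the double loop counts adjacent earlier rows ----------

theorem natMainEq (p : List (List Int)) (b : List Int) :
    ((tweaks b).map (fun q => p.countP (fun t => decide (t = q)))).sum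
      = p.countP (fun r => adjB r b) := by
  rw [swapCount]
  have hpoint : ∀ r ∈ p,
      (tweaks b).countP (fun t => decide (t = r)) = if adjB r b then 1 else 0 := by
    intro r _
    by_cases hl : r.length = b.length
    · rw [countTweaks b r hl]
      have htake : b.take r.length = b := by rw [hl, List.take_length]
      have hz : (List.zipWith (fun x y => |x - y|) r b).sum = dManhattan r b := by
        rw [dManh_take r b (le_of_eq hl), htake]
      rw [hz]
      by_cases hd : dManhattan r b = 1 <;> simp [adjB, hl, hd]
    · have hc : (tweaks b).countP (fun t => decide (t = r)) = 0 := by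
        apply List.countP_eq_zero.mpr
        intro t hmem
        simp only [decide_eq_true_eq]
        intro heq
        exact hl (heq ▸ tweaks_length b t hmem)
      rw [hc]
      simp [adjB, hl]
  rw [List.map_congr_left hpoint]
  exact sum_ite_pred _ _

theorem keyLemma (b : List Int) (p : List (List Int)) (d : PySem.Dict (List Int) Int) (adj : Int)
    (hd : ∀ q, d.getD q 0 = (p.countP (fun t => decide (t = q)) : Int)) :
    (PySem.List.pyRange 0 ((b.length : Int)) 1).foldl
      (fun adj k =>
        ([(1 : Int), -1]).foldl
          (fun adj dd =>
            let nb := b.set k.toNat (PySem.List.pyGetD b k 0 + dd)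
            adj + d.getD nb 0)
          adj)
      adj
    = adj + (p.countP (fun r => adjB r b) : Int) := by
  rw [foldl_pyRange_zero_nat]
  have hinner : ∀ (a : Int) (k : Nat), k ∈ List.range b.length →
      ([(1 : Int), -1]).foldl
          (fun a dd => a + d.getD (b.set ((k : Int)).toNat (PySem.List.pyGetD b (k : Int) 0 + dd)) 0)
          a
      = a + (fun q => d.getD q 0) (b.set k (b.getD k 0 + 1))
          + (fun q => d.getD q 0) (b.set k (b.getD k 0 + -1)) := by
    intro a k _
    simp [PySem.List.pyGetD_natCast]
  rw [pvFoldlCongr _ _ _ _ hinner, rowSumNat b (fun q => d.getD q 0) adj]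
  congr 1
  have hmap : (tweaks b).map (fun q => d.getD q 0)
      = List.map (fun s : Nat => (s : Int))
          ((tweaks b).map (fun q => p.countP (fun t => decide (t = q)))) := by
    rw [List.map_map]
    apply List.map_congr_left
    intro q _
    exact hd q
  rw [hmap, ← Nat.cast_list_sum, natMainEq]

-- ---------- B loop invariant ----------

theorem B_loop : ∀ (suf p : List (List Int)) (adj : Int),
    (suf.foldl stepB (adj, p.foldl (fun d x => d.insert x (d.getD x 0 + 1)) PySem.Dict.empty)).1
      = adj + (pcF' (fun r b => adjB r b) p suf : Int) := by
  intro suf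
  induction suf with
  | nil => intro p adj; simp [pcF']
  | cons b suf ih =>
    intro p adj
    have hd : ∀ q, (p.foldl (fun d x => d.insert x (d.getD x 0 + 1)) PySem.Dict.empty).getD q 0
        = (p.countP (fun t => decide (t = q)) : Int) := by
      intro q
      rw [PySem.Dict.getD_foldl_insert_add_one, PySem.Dict.getD_empty, count_eq_cnt]
      simp
    simp only [List.foldl_cons]
    have hstep : stepB (adj, p.foldl (fun d x => d.insert x (d.getD x 0 + 1)) PySem.Dict.empty) b
        = (adj + (p.countP (fun r => adjB r b) : Int),
           (p ++ [b]).foldl (fun d x => d.insert x (d.getD x 0 + 1)) PySem.Dict.empty) := by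
      unfold stepB
      simp only [List.foldl_append, List.foldl_cons, List.foldl_nil]
      refine Prod.ext ?_ rfl
      exact keyLemma b p _ adj hd
    rw [hstep, ih (p ++ [b])]
    simp only [pcF']
    push_cast
    ring

-- ---------- prefix-passing count equals pair count ----------

theorem pcF'_split (P : List Int → List Int → Bool) : ∀ (suf p : List (List Int)),
    pcF' P p suf
      = (suf.map (fun b => p.countP (fun r => P r b))).sum + pcF' P [] suf := by
  intro suf
  induction suf with
  | nil => intro p; simp [pcF']
  | cons b suf ih =>
    intro p
    simp only [pcF', List.map_cons, List.sum_cons, List.nil_append, List.countP_nil, Nat.zero_add]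
    rw [ih (p ++ [b]), ih [b]]
    have hp : (suf.map (fun b' => (p ++ [b]).countP (fun r => P r b')))
        = suf.map (fun b' => p.countP (fun r => P r b') + ([b] : List (List Int)).countP (fun r => P r b')) := by
      apply List.map_congr_left
      intro b' _
      rw [List.countP_append]
    rw [hp, sum_map_add_nat]
    omega

theorem pcF'_nil (P : List Int → List Int → Bool) :
    ∀ (data : List (List Int)), pcF' P [] data = pcF P data := by
  intro data
  induction data with
  | nil => simp [pcF', pcF]
  | cons x suf ih =>
    simp only [pcF', pcF, List.countP_nil, Nat.zero_add, List.nil_append]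
    rw [pcF'_split P suf [x], ih]
    congr 1
    have hm : (suf.map (fun b => ([x] : List (List Int)).countP (fun r => P r b)))
        = suf.map (fun b => if P x b then 1 else 0) := by
      apply List.map_congr_left
      intro b _
      simp [List.countP_cons]
    rw [hm]
    exact sum_ite_pred suf (fun b => P x b)

theorem part1_alt_eq (data : List (List Int)) :
    part1_alt data = 6 * (data.length : Int) - 2 * (pcF (fun r b => adjB r b) data : Int) := by
  rw [part1_alt_eq_fold]
  have h := B_loop data [] 0
  simp only [List.foldl_nil] at h
  rw [h, pcF'_nil]
  ring

-- ---------- splitting A's count into B's count plus the bad pairs ----------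

theorem countP_split (x : List Int) : ∀ (xs : List (List Int)), (∀ b ∈ xs, x.length ≤ b.length) →
    xs.countP (fun b => decide (dManhattan x b = 1))
      = xs.countP (fun b => adjB x b) + xs.countP (fun b => badP x b) := by
  intro xs
  induction xs with
  | nil => intro _; simp
  | cons b xs ih =>
    intro h
    have hb : x.length ≤ b.length := h b (by simp)
    simp only [List.countP_cons]
    rw [ih (fun b' hb' => h b' (by simp [hb']))]
    rcases lt_or_eq_of_le hb with hlt | heq
    · by_cases hd : dManhattan x b = 1 <;>
        simp [adjB, badP, hd, hlt, Nat.ne_of_lt hlt] <;> omega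
    · by_cases hd : dManhattan x b = 1 <;>
        simp [adjB, badP, hd, heq] <;> omega

theorem pcA_split : ∀ (data : List (List Int)), Pre_part1 data →
    pcF (fun x b => decide (dManhattan x b = 1)) data
      = pcF (fun r b => adjB r b) data + pcF (fun r b => badP r b) data := by
  intro data
  induction data with
  | nil => intro _; simp [pcF]
  | cons x xs ih =>
    intro hpre
    unfold Pre_part1 at hpre ih
    simp only [List.map_cons, List.pairwise_cons] at hpre
    have hlen : ∀ b ∈ xs, x.length ≤ b.length := by
      intro b hb
      exact hpre.1 b.length (List.mem_map_of_mem hb)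
    simp only [pcF]
    rw [countP_split x xs hlen, ih hpre.2]
    omega

-- ---------- D_ ↔ a bad pair exists ----------

theorem badC_zero_iff : ∀ (data : List (List Int)),
    pcF (fun r b => badP r b) data = 0 ↔ ¬ D_part1 data := by
  intro data
  induction data with
  | nil => simp [pcF, D_part1]
  | cons x xs ih =>
    unfold D_part1 at ih ⊢
    simp only [pcF, Nat.add_eq_zero_iff, List.countP_eq_zero, not_not, List.pairwise_cons] at ih ⊢
    rw [ih]
    constructor
    · rintro ⟨h1, h2⟩
      refine ⟨fun b hb => ?_, h2⟩
      have h3 := h1 b hb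
      simp only [badP, Bool.and_eq_true, decide_eq_true_eq, not_and] at h3 ⊢
      intro hl hd
      rw [truncDist_eq] at hd
      exact absurd hd (h3 hl)
    · rintro ⟨h1, h2⟩
      refine ⟨fun b hb => ?_, h2⟩
      have h3 := h1 b hb
      simp only [badP, Bool.and_eq_true, decide_eq_true_eq, not_and]
      intro hl hd
      exact h3 ⟨hl, by rw [truncDist_eq]; exact hd⟩

-- ===== VERDICT (by name: the statements are the Claim_ definitions above) =====
theorem part1_spec : Claim_unchanged_part1 := by
  intro data _ hpre hnd
  show part1 data = part1_alt data
  rw [part1_eq, part1_alt_eq, pcA_split data hpre, (badC_zero_iff data).mpr hnd]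
  push_cast
  ring

theorem part1_changed : Claim_changed_part1 := by
  unfold Claim_changed_part1; decide

theorem part1_tight : Claim_exact_part1 := by
  intro data _ hpre hD
  rw [part1_eq, part1_alt_eq, pcA_split data hpre]
  have hne : pcF (fun r b => badP r b) data ≠ 0 := by
    intro h0
    exact (badC_zero_iff data).mp h0 hD
  intro heq
  have : (pcF (fun r b => badP r b) data : Int) = 0 := by push_cast at heq ⊢; omega
  exact hne (by exact_mod_cast this)
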